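-- pv_equiv track=rewrite | github.com/drigos/python-scripts | waf-coverage-calculate.py | summarize_waf_info
-- ===== SOURCE A (Python) =====
-- from collections import defaultdict
--
-- def generate_profile_prefixes(*resources):
--     profile_prefixes = set()
--     for resource in resources:
--         profile_prefixes |= set(resource['total_resources'].keys())
--
--     return profile_prefixes
--
-- def summarize_waf_info(cloudfront_resources, elb_resources, apigw_resources):
--     combined_resources = {
--         'total_resources': defaultdict(int),
--         'waf_resources': defaultdict(int),
--     }
--     profile_prefixes = generate_profile_prefixes(cloudfront_resources, elb_resources, apigw_resources)
--
--     for profile_prefix in profile_prefixes: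
--         combined_resources['total_resources'][profile_prefix] = \
--             cloudfront_resources['total_resources'].get(profile_prefix, 0) + \
--             elb_resources['total_resources'].get(profile_prefix, 0) + \
--             apigw_resources['total_resources'].get(profile_prefix, 0)
--
--         combined_resources['waf_resources'][profile_prefix] = \
--             cloudfront_resources['waf_resources'].get(profile_prefix, 0) + \
--             elb_resources['waf_resources'].get(profile_prefix, 0) + \
--             apigw_resources['waf_resources'].get(profile_prefix, 0)
--
--     return combined_resources
-- ===== SOURCE B (Python) =====
-- def _sum_items(items):
--     """Fold a flat (key, value) stream into a dict, summing values per key."""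
--     acc = {}
--     for k, v in items:
--         acc[k] = acc.get(k, 0) + v
--     return acc
--
-- def summarize_waf_info(cloudfront_resources, elb_resources, apigw_resources):
--     sources = (cloudfront_resources, elb_resources, apigw_resources)
--     total = _sum_items(kv for r in sources for kv in r['total_resources'].items())
--     waf = _sum_items(kv for r in sources for kv in r['waf_resources'].items())
--     return {
--         'total_resources': total,
--         'waf_resources': {k: waf.get(k, 0) for k in total},
--     }
-- ===== Notes on version B (the rewrite author's own statement) =====
-- stated objective: simpler
-- what changed: Replaces the union-of-key-sets helper plus the per-key triple .get() loop by one generic fold: each section's items from all three dicts are flattened into a single (key,value) stream and summed into a dict by a shared helper, and the waf output is then produced by projecting the merged waf sums onto the total dict's keys with a comprehension.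
import Mathlib
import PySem

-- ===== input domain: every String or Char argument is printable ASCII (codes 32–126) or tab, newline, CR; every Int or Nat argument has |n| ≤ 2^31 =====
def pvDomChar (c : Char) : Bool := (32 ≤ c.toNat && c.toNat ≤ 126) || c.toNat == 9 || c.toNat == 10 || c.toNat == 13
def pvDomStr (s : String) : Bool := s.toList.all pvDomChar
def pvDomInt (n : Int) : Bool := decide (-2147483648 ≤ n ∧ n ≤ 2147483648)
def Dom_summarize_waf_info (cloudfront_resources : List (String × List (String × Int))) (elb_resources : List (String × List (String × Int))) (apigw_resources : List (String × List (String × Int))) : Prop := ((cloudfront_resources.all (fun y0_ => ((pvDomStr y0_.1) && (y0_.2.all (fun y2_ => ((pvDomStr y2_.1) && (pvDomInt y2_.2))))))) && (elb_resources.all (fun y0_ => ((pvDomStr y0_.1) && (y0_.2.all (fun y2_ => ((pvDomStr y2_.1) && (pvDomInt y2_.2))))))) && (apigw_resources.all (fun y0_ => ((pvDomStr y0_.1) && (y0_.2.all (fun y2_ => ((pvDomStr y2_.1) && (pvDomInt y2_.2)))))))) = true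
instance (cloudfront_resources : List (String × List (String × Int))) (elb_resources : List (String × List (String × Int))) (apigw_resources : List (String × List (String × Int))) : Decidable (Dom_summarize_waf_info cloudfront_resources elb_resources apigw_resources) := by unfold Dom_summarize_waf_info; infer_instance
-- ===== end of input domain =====

-- B drops the key-set-union helper and the per-key triple .get() loop: each section's items from
-- all three dicts are flattened into one (key, value) stream and folded into a dict by a shared
-- helper, and the waf output is the merged waf sums projected onto the total dict's keys.
-- Output dicts are association lists; Python's set/dict iteration order is modelled as insertion order.

-- ===== PORT A =====
-- resource['total_resources'] / ['waf_resources'] raise KeyError when the key is missing; Pre_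
-- excludes that, so the getD default [] is never the value used.
def generate_profile_prefixes (resources : List (List (String × List (String × Int)))) : PySem.Set String :=
  resources.foldl
    (fun profile_prefixes resource =>
      PySem.Set.union profile_prefixes
        (PySem.Set.ofList
          (PySem.Dict.keys (PySem.Dict.mk ((PySem.Dict.mk resource).getD "total_resources" [])))))
    PySem.Set.empty

def summarize_waf_info (cloudfront_resources : List (String × List (String × Int))) (elb_resources : List (String × List (String × Int))) (apigw_resources : List (String × List (String × Int))) : List (String × List (String × Int)) :=
  let profile_prefixes := generate_profile_prefixes [cloudfront_resources, elb_resources, apigw_resources]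
  let combined :=
    profile_prefixes.foldl
      (fun (c : PySem.Dict String Int × PySem.Dict String Int) profile_prefix =>
        (c.1.insert profile_prefix
            ((PySem.Dict.mk ((PySem.Dict.mk cloudfront_resources).getD "total_resources" [])).getD profile_prefix 0
              + (PySem.Dict.mk ((PySem.Dict.mk elb_resources).getD "total_resources" [])).getD profile_prefix 0
              + (PySem.Dict.mk ((PySem.Dict.mk apigw_resources).getD "total_resources" [])).getD profile_prefix 0),
         c.2.insert profile_prefix
            ((PySem.Dict.mk ((PySem.Dict.mk cloudfront_resources).getD "waf_resources" [])).getD profile_prefix 0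
              + (PySem.Dict.mk ((PySem.Dict.mk elb_resources).getD "waf_resources" [])).getD profile_prefix 0
              + (PySem.Dict.mk ((PySem.Dict.mk apigw_resources).getD "waf_resources" [])).getD profile_prefix 0)))
      (PySem.Dict.empty, PySem.Dict.empty)
  [("total_resources", combined.1.items), ("waf_resources", combined.2.items)]

-- ===== PORT B =====
-- acc[k] = acc.get(k, 0) + v is exactly Dict.modify k 0 (· + v)
def sum_items (items : List (String × Int)) : PySem.Dict String Int :=
  items.foldl (fun (acc : PySem.Dict String Int) kv => acc.modify kv.1 0 (· + kv.2)) PySem.Dict.empty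

def summarize_waf_info_alt (cloudfront_resources : List (String × List (String × Int))) (elb_resources : List (String × List (String × Int))) (apigw_resources : List (String × List (String × Int))) : List (String × List (String × Int)) :=
  let sources := [cloudfront_resources, elb_resources, apigw_resources]
  let total := sum_items (sources.flatMap (fun r => (PySem.Dict.mk r).getD "total_resources" []))
  let waf := sum_items (sources.flatMap (fun r => (PySem.Dict.mk r).getD "waf_resources" []))
  [("total_resources", total.items),
   ("waf_resources",
     (total.keys.foldl (fun (w : PySem.Dict String Int) k => w.insert k (waf.getD k 0))
       PySem.Dict.empty).items)]

-- ===== PRECONDITION & SPEC =====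
-- Pre_ excludes (a) inputs where one of the six section keys is missing: there B (which reads
-- 'waf_resources' unconditionally) raises KeyError, and A raises too except in the corner where
-- every present total section is empty so A's loop body never runs and A returns empty dicts; and
-- (b) association lists whose section lists have duplicate keys, which do not represent a Python
-- dict (a Python dict collapses them).
def Pre_summarize_waf_info (cloudfront_resources : List (String × List (String × Int))) (elb_resources : List (String × List (String × Int))) (apigw_resources : List (String × List (String × Int))) : Prop :=
  ((PySem.Dict.mk cloudfront_resources).get? "total_resources").isSome = true ∧
  ((PySem.Dict.mk elb_resources).get? "total_resources").isSome = true ∧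
  ((PySem.Dict.mk apigw_resources).get? "total_resources").isSome = true ∧
  ((PySem.Dict.mk cloudfront_resources).get? "waf_resources").isSome = true ∧
  ((PySem.Dict.mk elb_resources).get? "waf_resources").isSome = true ∧
  ((PySem.Dict.mk apigw_resources).get? "waf_resources").isSome = true ∧
  (((PySem.Dict.mk cloudfront_resources).getD "total_resources" []).map Prod.fst).Nodup ∧
  (((PySem.Dict.mk elb_resources).getD "total_resources" []).map Prod.fst).Nodup ∧
  (((PySem.Dict.mk apigw_resources).getD "total_resources" []).map Prod.fst).Nodup ∧
  (((PySem.Dict.mk cloudfront_resources).getD "waf_resources" []).map Prod.fst).Nodup ∧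
  (((PySem.Dict.mk elb_resources).getD "waf_resources" []).map Prod.fst).Nodup ∧
  (((PySem.Dict.mk apigw_resources).getD "waf_resources" []).map Prod.fst).Nodup
instance (cloudfront_resources : List (String × List (String × Int))) (elb_resources : List (String × List (String × Int))) (apigw_resources : List (String × List (String × Int))) : Decidable (Pre_summarize_waf_info cloudfront_resources elb_resources apigw_resources) := by unfold Pre_summarize_waf_info; infer_instance

def pvWitness_summarize_waf_info : (List (String × List (String × Int))) × (List (String × List (String × Int))) × (List (String × List (String × Int))) :=
  ([("total_resources", [("a", 1)]), ("waf_resources", [("a", 1)])],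
   [("total_resources", [("b", 2)]), ("waf_resources", [])],
   [("total_resources", [("a", 3), ("c", 0)]), ("waf_resources", [("c", 2), ("z", 7)])])

def Spec_summarize_waf_info (cloudfront_resources : List (String × List (String × Int))) (elb_resources : List (String × List (String × Int))) (apigw_resources : List (String × List (String × Int))) (out : List (String × List (String × Int))) : Prop := out = summarize_waf_info_alt cloudfront_resources elb_resources apigw_resources
instance (cloudfront_resources : List (String × List (String × Int))) (elb_resources : List (String × List (String × Int))) (apigw_resources : List (String × List (String × Int))) (out : List (String × List (String × Int))) : Decidable (Spec_summarize_waf_info cloudfront_resources elb_resources apigw_resources out) := by unfold Spec_summarize_waf_info; infer_instance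

-- ===== CLAIM (what is proved, stated in full; the proofs are below) =====
def Claim_equal_summarize_waf_info : Prop := ∀ (cloudfront_resources : List (String × List (String × Int))) (elb_resources : List (String × List (String × Int))) (apigw_resources : List (String × List (String × Int))), Dom_summarize_waf_info cloudfront_resources elb_resources apigw_resources → Pre_summarize_waf_info cloudfront_resources elb_resources apigw_resources → Spec_summarize_waf_info cloudfront_resources elb_resources apigw_resources (summarize_waf_info cloudfront_resources elb_resources apigw_resources)

-- ===== LEMMAS AND PROOFS =====

-- folding Set.add only appends
theorem foldl_add_prefix {α : Type} [BEq α] (l : List α) (t : PySem.Set α) :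
    ∃ w, List.foldl PySem.Set.add t l = t ++ w := by
  induction l generalizing t with
  | nil => exact ⟨[], by simp⟩
  | cons a l ih =>
    simp only [List.foldl_cons]
    by_cases h : List.contains t a = true
    · have : PySem.Set.add t a = t := by simp [PySem.Set.add, PySem.Set.contains, h]
      rw [this]; exact ih t
    · have : PySem.Set.add t a = t ++ [a] := by
        simp [PySem.Set.add, PySem.Set.contains, h]
      rw [this]
      obtain ⟨w, hw⟩ := ih (t ++ [a])
      exact ⟨[a] ++ w, by simp [hw]⟩

-- a pre-seeded Set.add fold collapses once the seed is contained in the accumulator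
theorem foldl_add_drop {α : Type} [BEq α] [LawfulBEq α] (l : List α) (t s : PySem.Set α)
    (h : ∀ x, x ∈ t → x ∈ s) :
    List.foldl PySem.Set.add s ((List.foldl PySem.Set.add t l).drop t.length) =
      List.foldl PySem.Set.add s l := by
  induction l generalizing t s with
  | nil => simp
  | cons a l ih =>
    simp only [List.foldl_cons]
    by_cases ht : a ∈ t
    · have hadd : PySem.Set.add t a = t := by
        simp [PySem.Set.add, PySem.Set.contains, ht]
      have hs : PySem.Set.add s a = s := by
        simp [PySem.Set.add, PySem.Set.contains, h a ht]
      rw [hadd, hs]; exact ih t s h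
    · have hadd : PySem.Set.add t a = t ++ [a] := by
        simp [PySem.Set.add, PySem.Set.contains, ht]
      rw [hadd]
      obtain ⟨w, hw⟩ := foldl_add_prefix l (t ++ [a])
      have hdrop : (List.foldl PySem.Set.add (t ++ [a]) l).drop t.length = a :: w := by
        rw [hw]; simp
      have hdrop' : (List.foldl PySem.Set.add (t ++ [a]) l).drop (t ++ [a]).length = w := by
        rw [hw]; simp
      rw [hdrop]
      simp only [List.foldl_cons]
      have h' : ∀ x, x ∈ t ++ [a] → x ∈ PySem.Set.add s a := by
        intro x hx
        rw [PySem.Set.mem_add]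
        rcases List.mem_append.mp hx with h1 | h1
        · exact Or.inl (h x h1)
        · exact Or.inr (List.mem_singleton.mp h1)
      have := ih (t ++ [a]) (PySem.Set.add s a) h'
      rw [hdrop'] at this
      exact this

-- set(keys) | union equals plain update by the key list
theorem update_ofList {α : Type} [BEq α] [LawfulBEq α] (s : PySem.Set α) (l : List α) :
    PySem.Set.update s (PySem.Set.ofList l) = PySem.Set.update s l := by
  have := foldl_add_drop (α := α) l PySem.Set.empty s (by intro x hx; simp [PySem.Set.empty] at hx)
  simpa [PySem.Set.update, PySem.Set.ofList, PySem.Set.empty] using this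

-- getD after B's accumulating fold: seed value plus the sum of matching values
theorem getD_modify_fold (l : List (String × Int)) (d : PySem.Dict String Int) (k : String) :
    (l.foldl (fun (t : PySem.Dict String Int) pc => t.modify pc.1 0 (· + pc.2)) d).getD k 0 =
      d.getD k 0 + ((l.filter (fun pc => pc.1 == k)).map Prod.snd).sum := by
  induction l generalizing d with
  | nil => simp
  | cons a l ih =>
    simp only [List.foldl_cons, List.filter_cons]
    rw [ih]
    by_cases h : a.1 = k
    · simp [h, add_assoc, add_comm]
      ring
    · simp [PySem.Dict.getD_modify, h, Ne.symm h, beq_iff_eq]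

-- on a duplicate-free association list the matching-value sum is the dict lookup
theorem filter_sum_eq_getD (l : List (String × Int)) (k : String)
    (h : (l.map Prod.fst).Nodup) :
    ((l.filter (fun pc => pc.1 == k)).map Prod.snd).sum = (PySem.Dict.mk l).getD k 0 := by
  induction l with
  | nil => simp [PySem.Dict.getD, PySem.Dict.get?]
  | cons a l ih =>
    simp only [List.map_cons, List.nodup_cons] at h
    simp only [List.filter_cons]
    by_cases hk : a.1 = k
    · have hnil : l.filter (fun pc => pc.1 == k) = [] := by
        rw [List.filter_eq_nil_iff]
        intro p hp hpk
        rw [beq_iff_eq] at hpk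
        apply h.1
        rw [hk, ← hpk]
        exact List.mem_map_of_mem hp
      rw [if_pos (by simp [hk])]
      simp [hnil, PySem.Dict.getD, PySem.Dict.get?, hk]
    · rw [if_neg (by simp [hk])]
      rw [ih h.2]
      simp [PySem.Dict.getD, PySem.Dict.get?, hk, beq_iff_eq]

-- lookup in sum_items of a three-list stream = the three separate dict lookups added
theorem getD_sum_items (l1 l2 l3 : List (String × Int)) (k : String)
    (h1 : (l1.map Prod.fst).Nodup) (h2 : (l2.map Prod.fst).Nodup) (h3 : (l3.map Prod.fst).Nodup) :
    (sum_items (l1 ++ (l2 ++ l3))).getD k 0 =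
      (PySem.Dict.mk l1).getD k 0 + (PySem.Dict.mk l2).getD k 0 + (PySem.Dict.mk l3).getD k 0 := by
  unfold sum_items
  rw [getD_modify_fold]
  simp only [List.filter_append, List.map_append, List.sum_append,
    filter_sum_eq_getD l1 k h1, filter_sum_eq_getD l2 k h2, filter_sum_eq_getD l3 k h3]
  simp [PySem.Dict.getD, PySem.Dict.get?, PySem.Dict.empty, add_assoc]

theorem summarize_waf_info_spec : Claim_equal_summarize_waf_info := by
  intro cf elb ap _ hpre
  obtain ⟨-, -, -, -, -, -, hn1, hn2, hn3, hw1, hw2, hw3⟩ := hpre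
  unfold Spec_summarize_waf_info summarize_waf_info summarize_waf_info_alt generate_profile_prefixes
  simp only [List.foldl_cons, List.foldl_nil, List.flatMap_cons, List.flatMap_nil, List.append_nil]
  set cfT := (PySem.Dict.mk cf).getD "total_resources" [] with hcfT
  set elbT := (PySem.Dict.mk elb).getD "total_resources" [] with helbT
  set apT := (PySem.Dict.mk ap).getD "total_resources" [] with hapT
  set cfW := (PySem.Dict.mk cf).getD "waf_resources" [] with hcfW
  set elbW := (PySem.Dict.mk elb).getD "waf_resources" [] with helbW
  set apW := (PySem.Dict.mk ap).getD "waf_resources" [] with hapW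
  -- A's prefix set, rewritten to plain updates by the raw key lists
  have hpref :
      PySem.Set.union (PySem.Set.union (PySem.Set.union PySem.Set.empty
          (PySem.Set.ofList (PySem.Dict.keys (PySem.Dict.mk cfT))))
          (PySem.Set.ofList (PySem.Dict.keys (PySem.Dict.mk elbT))))
          (PySem.Set.ofList (PySem.Dict.keys (PySem.Dict.mk apT))) =
        PySem.Set.update (PySem.Set.update (PySem.Set.update PySem.Set.empty
          (cfT.map Prod.fst)) (elbT.map Prod.fst)) (apT.map Prod.fst) := by
    simp only [PySem.Set.union, update_ofList, PySem.Dict.keys]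
  set prefixes := PySem.Set.update (PySem.Set.update (PySem.Set.update PySem.Set.empty
      (cfT.map Prod.fst)) (elbT.map Prod.fst)) (apT.map Prod.fst) with hprefixes
  rw [hpref]
  -- B's accumulated total dict
  set total := sum_items (cfT ++ (elbT ++ apT)) with htotal
  set waf := sum_items (cfW ++ (elbW ++ apW)) with hwaf
  have hkeys : total.keys = prefixes := by
    rw [htotal, hprefixes]
    unfold sum_items
    rw [PySem.Dict.keys_foldl_modify_key (cfT ++ (elbT ++ apT)) Prod.fst 0 (fun _ pc v => v + pc.2)]
    simp [PySem.Set.update, List.foldl_append, PySem.Dict.keys, PySem.Dict.empty, PySem.Set.empty]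
  have hnodup : total.keys.Nodup := by
    rw [htotal]
    unfold sum_items
    apply PySem.Dict.nodup_keys_foldl_modify_key (cfT ++ (elbT ++ apT)) Prod.fst 0
      (fun _ pc v => v + pc.2)
    simp [PySem.Dict.keys, PySem.Dict.empty]
  have hnodup' : prefixes.Nodup := hkeys ▸ hnodup
  -- every lookup in B's merged dicts is the corresponding three-way sum of A
  have hgetD : ∀ k, total.getD k 0 =
      (PySem.Dict.mk cfT).getD k 0 + (PySem.Dict.mk elbT).getD k 0 + (PySem.Dict.mk apT).getD k 0 :=
    fun k => htotal ▸ getD_sum_items cfT elbT apT k hn1 hn2 hn3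
  have hgetDW : ∀ k, waf.getD k 0 =
      (PySem.Dict.mk cfW).getD k 0 + (PySem.Dict.mk elbW).getD k 0 + (PySem.Dict.mk apW).getD k 0 :=
    fun k => hwaf ▸ getD_sum_items cfW elbW apW k hw1 hw2 hw3
  -- A's pair loop splits into two fresh-key insert loops
  have hsplit :
      (prefixes.foldl
        (fun (c : PySem.Dict String Int × PySem.Dict String Int) profile_prefix =>
          (c.1.insert profile_prefix
              ((PySem.Dict.mk cfT).getD profile_prefix 0
                + (PySem.Dict.mk elbT).getD profile_prefix 0
                + (PySem.Dict.mk apT).getD profile_prefix 0),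
           c.2.insert profile_prefix
              ((PySem.Dict.mk cfW).getD profile_prefix 0
                + (PySem.Dict.mk elbW).getD profile_prefix 0
                + (PySem.Dict.mk apW).getD profile_prefix 0)))
        (PySem.Dict.empty, PySem.Dict.empty)) =
      (prefixes.foldl (fun (d : PySem.Dict String Int) p =>
          d.insert p
            ((PySem.Dict.mk cfT).getD p 0 + (PySem.Dict.mk elbT).getD p 0
              + (PySem.Dict.mk apT).getD p 0)) PySem.Dict.empty,
       prefixes.foldl (fun (d : PySem.Dict String Int) p =>
          d.insert p
            ((PySem.Dict.mk cfW).getD p 0 + (PySem.Dict.mk elbW).getD p 0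
              + (PySem.Dict.mk apW).getD p 0)) PySem.Dict.empty) :=
    PySem.List.foldl_prod_mk
      (fun (d : PySem.Dict String Int) (p : String) =>
        d.insert p
          ((PySem.Dict.mk cfT).getD p 0 + (PySem.Dict.mk elbT).getD p 0
            + (PySem.Dict.mk apT).getD p 0))
      (fun (d : PySem.Dict String Int) (p : String) =>
        d.insert p
          ((PySem.Dict.mk cfW).getD p 0 + (PySem.Dict.mk elbW).getD p 0
            + (PySem.Dict.mk apW).getD p 0))
      prefixes PySem.Dict.empty PySem.Dict.empty
  rw [hsplit]
  have hfreshT := PySem.Dict.items_foldl_insert_fresh prefixes (fun p => p)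
      (fun p => (PySem.Dict.mk cfT).getD p 0 + (PySem.Dict.mk elbT).getD p 0
        + (PySem.Dict.mk apT).getD p 0) PySem.Dict.empty
      (by intro a _; simp [PySem.Dict.contains, PySem.Dict.empty])
      (by simpa using hnodup')
  have hfreshW := PySem.Dict.items_foldl_insert_fresh prefixes (fun p => p)
      (fun p => (PySem.Dict.mk cfW).getD p 0 + (PySem.Dict.mk elbW).getD p 0
        + (PySem.Dict.mk apW).getD p 0) PySem.Dict.empty
      (by intro a _; simp [PySem.Dict.contains, PySem.Dict.empty])
      (by simpa using hnodup')
  -- B's projection loop over total's keys is a fresh-key insert loop too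
  have hfreshB := PySem.Dict.items_foldl_insert_fresh total.keys (fun p => p)
      (fun k => waf.getD k 0) PySem.Dict.empty
      (by intro a _; simp [PySem.Dict.contains, PySem.Dict.empty])
      (by simpa using hnodup)
  -- B's total items as a map over its keys
  have hitemsB : total.items = total.keys.map (fun k => (k, total.getD k 0)) :=
    PySem.Dict.items_eq_map_keys total hnodup 0
  refine List.ext_getElem (by simp) ?_
  intro i h1 h2
  simp only [List.length_cons, List.length_nil] at h1
  interval_cases i <;> simp only [List.getElem_cons_zero, List.getElem_cons_succ]
  · -- total_resources component
    refine Prod.ext rfl ?_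
    show (prefixes.foldl _ PySem.Dict.empty).items = total.items
    rw [hfreshT, hitemsB, hkeys]
    exact (List.map_congr_left fun k _ => by rw [hgetD k]).symm
  · -- waf_resources component
    refine Prod.ext rfl ?_
    show (prefixes.foldl _ PySem.Dict.empty).items = (total.keys.foldl _ PySem.Dict.empty).items
    rw [hfreshW, hfreshB, hkeys]
    exact congrArg (PySem.Dict.empty.items ++ ·)
      (List.map_congr_left fun k _ => by simp only [hgetDW])
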